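-- pv_equiv track=rewrite | github.com/franpuch/Algoritmos-y-Estructura-de-Datos-I | Segundo Parcial - Python/Segundo_Parcial_Resolución_Tema_2.py | hay_3_caracteres_consecutivos_iguales
-- ===== SOURCE A (Python) =====
-- def hay_3_caracteres_consecutivos_iguales (columnas:list[list[str]] , caracter:str) -> bool :
--     res:bool = False
--
--     for i in columnas :
--         ultimo_índice_válido:int = len(i) - 3
--         for j in range (0,(ultimo_índice_válido + 1),1) :
--             if ((i[j] == caracter) and (i[j + 1] == caracter) and (i[j + 2] == caracter)) :
--                 res = True
--
--     return res
-- ===== SOURCE B (Python) =====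
-- def hay_3_caracteres_consecutivos_iguales(columnas: list[list[str]], caracter: str) -> bool:
--     for columna in columnas:
--         racha = 0
--         for elemento in columna:
--             if elemento == caracter:
--                 racha += 1
--                 if racha == 3:
--                     return True
--             else:
--                 racha = 0
--     return False
-- ===== Notes on version B (the rewrite author's own statement) =====
-- stated objective: alternative
-- what changed: Replaces the triple-indexed sliding-window test over range(len-2) in each column with a single left-to-right pass keeping a run-length counter that resets on mismatch and returns True as soon as a run reaches 3, instead of always scanning every window of every column.
import Mathlib
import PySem

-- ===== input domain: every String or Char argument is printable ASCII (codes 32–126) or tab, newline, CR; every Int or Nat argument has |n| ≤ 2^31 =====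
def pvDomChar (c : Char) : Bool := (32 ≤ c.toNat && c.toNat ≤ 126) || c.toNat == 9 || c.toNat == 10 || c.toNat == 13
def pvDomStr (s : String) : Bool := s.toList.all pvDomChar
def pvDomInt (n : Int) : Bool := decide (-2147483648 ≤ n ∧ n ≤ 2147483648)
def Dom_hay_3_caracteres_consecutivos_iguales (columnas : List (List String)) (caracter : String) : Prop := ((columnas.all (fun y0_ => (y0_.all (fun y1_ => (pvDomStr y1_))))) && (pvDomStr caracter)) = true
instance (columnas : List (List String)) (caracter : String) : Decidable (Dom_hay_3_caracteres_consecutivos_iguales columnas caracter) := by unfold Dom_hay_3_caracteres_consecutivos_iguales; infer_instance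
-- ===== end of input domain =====

-- B replaces A's triple-indexed sliding-window scan with a single run-length-counter pass per
-- column that resets on mismatch and returns early once a run of 3 is seen (same return value).

-- ===== PORT A =====
def hay_3_caracteres_consecutivos_iguales (columnas : List (List String)) (caracter : String) : Bool :=
  columnas.foldl
    (fun res i =>
      let ultimo_indice_valido : Int := (i.length : Int) - 3
      (PySem.List.pyRange 0 (ultimo_indice_valido + 1) 1).foldl
        (fun res j =>
          if (PySem.List.pyGetD i j "" == caracter) &&
             (PySem.List.pyGetD i (j + 1) "" == caracter) &&
             (PySem.List.pyGetD i (j + 2) "" == caracter) then true else res)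
        res)
    false

-- ===== PORT B =====
-- inner loop of Source B: run counter over one column, early True at a run of 3
def pvRacha (caracter : String) (racha : Nat) : List String → Bool
  | [] => false
  | elemento :: rest =>
    if elemento == caracter then
      if racha + 1 == 3 then true else pvRacha caracter (racha + 1) rest
    else pvRacha caracter 0 rest

def hay_3_caracteres_consecutivos_iguales_alt (columnas : List (List String)) (caracter : String) : Bool :=
  match columnas with
  | [] => false
  | columna :: rest =>
    if pvRacha caracter 0 columna then true
    else hay_3_caracteres_consecutivos_iguales_alt rest caracter

-- ===== PRECONDITION & SPEC =====
def Spec_hay_3_caracteres_consecutivos_iguales (columnas : List (List String)) (caracter : String) (out : Bool) : Prop := out = hay_3_caracteres_consecutivos_iguales_alt columnas caracter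
instance (columnas : List (List String)) (caracter : String) (out : Bool) : Decidable (Spec_hay_3_caracteres_consecutivos_iguales columnas caracter out) := by unfold Spec_hay_3_caracteres_consecutivos_iguales; infer_instance

-- ===== CLAIM (what is proved, stated in full; the proofs are below) =====
def Claim_equal_hay_3_caracteres_consecutivos_iguales : Prop := ∀ (columnas : List (List String)) (caracter : String), Dom_hay_3_caracteres_consecutivos_iguales columnas caracter → Spec_hay_3_caracteres_consecutivos_iguales columnas caracter (hay_3_caracteres_consecutivos_iguales columnas caracter)

-- ===== LEMMAS AND PROOFS =====

-- "the first m elements of the list exist and all equal c"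
def pvPrefEq (c : String) : Nat → List String → Bool
  | 0, _ => true
  | _ + 1, [] => false
  | m + 1, x :: t => (x == c) && pvPrefEq c m t

-- "some window of 3 consecutive elements all equal c"
def pvHasWin (c : String) : List String → Bool
  | [] => false
  | x :: t => pvPrefEq c 3 (x :: t) || pvHasWin c t

theorem pvPrefEq_succ_true {c : String} {m : Nat} {t : List String}
    (h : pvPrefEq c (m + 1) t = true) : pvPrefEq c m t = true := by
  induction m generalizing t with
  | zero => simp [pvPrefEq]
  | succ k ih =>
    cases t with
    | nil => simp [pvPrefEq] at h
    | cons x u =>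
      simp [pvPrefEq] at h ⊢
      exact ⟨h.1, ih h.2⟩

theorem pvPrefEq3_or_hasWin (c : String) (t : List String) :
    (pvPrefEq c 3 t || pvHasWin c t) = pvHasWin c t := by
  cases t with
  | nil => simp [pvPrefEq, pvHasWin]
  | cons x u => simp [pvHasWin, Bool.or_assoc]

-- invariant of B's run counter: with racha ≤ 2 matches already seen, success means
-- either the next 3 - racha elements match, or some later window matches
theorem pvRacha_eq (c : String) (xs : List String) :
    ∀ racha : Nat, racha ≤ 2 →
      pvRacha c racha xs = (pvPrefEq c (3 - racha) xs || pvHasWin c xs) := by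
  induction xs with
  | nil =>
    intro racha h
    interval_cases racha <;> simp [pvRacha, pvPrefEq, pvHasWin]
  | cons x t ih =>
    intro racha h
    by_cases hx : x == c
    · interval_cases racha
      · have := ih 1 (by omega)
        simp [pvRacha, hx, this, pvHasWin, pvPrefEq, Bool.or_assoc]
      · have := ih 2 (by omega)
        simp only [pvRacha, hx, if_true, Nat.reduceAdd, this,
          pvHasWin, pvPrefEq, Nat.reduceSub, Bool.true_and]
        cases h1 : pvPrefEq c 1 t with
        | true => simp
        | false =>
          cases h2 : pvPrefEq c 2 t with
          | true => exact absurd (pvPrefEq_succ_true h2) (by simp [h1])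
          | false => simp
      · simp [pvRacha, hx, pvPrefEq]
    · have hx' : (x == c) = false := by simpa using hx
      have h0 := ih 0 (by omega)
      have habs := pvPrefEq3_or_hasWin c t
      interval_cases racha <;>
        simp [pvRacha, hx', h0, pvHasWin, pvPrefEq, habs]

-- B's per-column scan decides "has a window of 3"
theorem pvRacha_zero (c : String) (xs : List String) :
    pvRacha c 0 xs = pvHasWin c xs := by
  rw [pvRacha_eq c xs 0 (by omega)]
  exact pvPrefEq3_or_hasWin c xs

-- generic shape of A's inner loop: flag set iff some element satisfies the test
theorem pvFoldlIf {α : Type} (p : α → Bool) (l : List α) (res : Bool) :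
    l.foldl (fun r j => if p j then true else r) res = (res || l.any p) := by
  induction l generalizing res with
  | nil => simp
  | cons x t ih =>
    rw [List.foldl_cons, ih]
    cases hx : p x <;> simp [hx]

-- A's window test over all valid start indices is pvHasWin
theorem pvAnyWin (c : String) (xs : List String) :
    ((List.range (xs.length - 2)).any fun k =>
        (xs.getD k "" == c) && (xs.getD (k + 1) "" == c) && (xs.getD (k + 2) "" == c))
      = pvHasWin c xs := by
  induction xs with
  | nil => simp [pvHasWin]
  | cons a t ih =>
    match t with
    | [] => simp [pvHasWin, pvPrefEq]
    | [b] => simp [pvHasWin, pvPrefEq]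
    | b :: d :: r =>
      have hlen : (a :: b :: d :: r).length - 2 = r.length + 1 := by simp
      have hL : (b :: d :: r).length - 2 = r.length := by simp
      rw [hL] at ih
      rw [hlen, List.range_succ_eq_map, List.any_cons, List.any_map]
      simp only [List.getD_cons_succ] at ih
      simp only [Function.comp_def, Nat.succ_eq_add_one, List.getD_cons_succ,
        List.getD_cons_zero]
      rw [ih]
      simp [pvHasWin, pvPrefEq, Bool.and_assoc]

-- A's inner foldl over pyRange equals res || pvHasWin
theorem pvInnerA (c : String) (xs : List String) (res : Bool) :
    ((PySem.List.pyRange 0 ((xs.length : Int) - 3 + 1) 1).foldl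
        (fun res j =>
          if (PySem.List.pyGetD xs j "" == c) &&
             (PySem.List.pyGetD xs (j + 1) "" == c) &&
             (PySem.List.pyGetD xs (j + 2) "" == c) then true else res)
        res)
      = (res || pvHasWin c xs) := by
  simp only [PySem.List.pyRange_one, List.foldl_map]
  rw [pvFoldlIf]
  have hn : ((xs.length : Int) - 3 + 1 - 0).toNat = xs.length - 2 := by omega
  rw [hn]
  have hfun : (fun k : Nat =>
      (PySem.List.pyGetD xs (0 + (k : Int)) "" == c) &&
      (PySem.List.pyGetD xs (0 + (k : Int) + 1) "" == c) &&
      (PySem.List.pyGetD xs (0 + (k : Int) + 2) "" == c))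
      = (fun k : Nat =>
      (xs.getD k "" == c) && (xs.getD (k + 1) "" == c) && (xs.getD (k + 2) "" == c)) := by
    funext k
    have h0 : (0 : Int) + (k : Int) = ((k : Nat) : Int) := by ring
    have h1 : (0 : Int) + (k : Int) + 1 = ((k + 1 : Nat) : Int) := by push_cast; ring
    have h2 : (0 : Int) + (k : Int) + 2 = ((k + 2 : Nat) : Int) := by push_cast; ring
    rw [h2, h1, h0, PySem.List.pyGetD_natCast, PySem.List.pyGetD_natCast,
      PySem.List.pyGetD_natCast]
  rw [hfun, pvAnyWin]

-- A's outer foldl over the columns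
theorem pvOuterA (c : String) (l : List (List String)) (res : Bool) :
    (l.foldl
        (fun res i =>
          let ultimo_indice_valido : Int := (i.length : Int) - 3
          (PySem.List.pyRange 0 (ultimo_indice_valido + 1) 1).foldl
            (fun res j =>
              if (PySem.List.pyGetD i j "" == c) &&
                 (PySem.List.pyGetD i (j + 1) "" == c) &&
                 (PySem.List.pyGetD i (j + 2) "" == c) then true else res)
            res)
        res)
      = (res || l.any (pvHasWin c)) := by
  induction l generalizing res with
  | nil => simp
  | cons i t ih =>
    simp only [List.foldl_cons, List.any_cons]
    rw [ih, pvInnerA, Bool.or_assoc]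

theorem pvAltB (c : String) (l : List (List String)) :
    hay_3_caracteres_consecutivos_iguales_alt l c = l.any (pvHasWin c) := by
  induction l with
  | nil => simp [hay_3_caracteres_consecutivos_iguales_alt]
  | cons i t ih =>
    simp [hay_3_caracteres_consecutivos_iguales_alt, pvRacha_zero, ih]

-- ===== VERDICT (by name: the statement is the Claim_ definition above) =====
theorem hay_3_caracteres_consecutivos_iguales_spec : Claim_equal_hay_3_caracteres_consecutivos_iguales := by
  intro columnas caracter _
  unfold Spec_hay_3_caracteres_consecutivos_iguales hay_3_caracteres_consecutivos_iguales
  rw [pvOuterA, pvAltB, Bool.false_or]
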